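-- pv_equiv track=rewrite | github.com/jgoriasilva/DSA | amazon/trucks_for_items.py | getTrucksForItems
-- ===== SOURCE A (Python) =====
-- def getTrucksForItems(trucks: list[int], items: list[int]) -> None:
--     trucks = sorted([(truck, i) for i, truck in enumerate(trucks)], key=lambda x: x[0])
--
--     def binary_search(trucks: list[int], item: int) -> int:
--         l, r = 0, len(trucks) - 1
--         while l <= r:
--             m = (l+r) // 2
--             if trucks[m][0] > item:
--                 r = m-1
--             else:
--                 l = m+1
--         if l < len(trucks): return trucks[l][1]
--         return -1
--
--     res = []
--     for item in items:
--         res.append(binary_search(trucks, item))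
--
--     return res
-- ===== SOURCE B (Python) =====
-- def getTrucksForItems(trucks: list[int], items: list[int]) -> None:
--     ts = sorted([(t, i) for i, t in enumerate(trucks)], key=lambda x: x[0])
--     n = len(ts)
--     res = [-1] * len(items)
--     p = 0
--     for j, item in sorted(enumerate(items), key=lambda x: x[1]):
--         while p < n and ts[p][0] <= item:
--             p += 1
--         if p < n:
--             res[j] = ts[p][1]
--     return res
-- ===== Notes on version B (the rewrite author's own statement) =====
-- stated objective: faster
-- what changed: Replaces A's per-item binary search over the capacity-sorted trucks by a single monotone pointer sweep: items are sorted with their original positions, one pointer advances through the sorted trucks, and each answer is scattered back into the result at the item's original index.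
import Mathlib
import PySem

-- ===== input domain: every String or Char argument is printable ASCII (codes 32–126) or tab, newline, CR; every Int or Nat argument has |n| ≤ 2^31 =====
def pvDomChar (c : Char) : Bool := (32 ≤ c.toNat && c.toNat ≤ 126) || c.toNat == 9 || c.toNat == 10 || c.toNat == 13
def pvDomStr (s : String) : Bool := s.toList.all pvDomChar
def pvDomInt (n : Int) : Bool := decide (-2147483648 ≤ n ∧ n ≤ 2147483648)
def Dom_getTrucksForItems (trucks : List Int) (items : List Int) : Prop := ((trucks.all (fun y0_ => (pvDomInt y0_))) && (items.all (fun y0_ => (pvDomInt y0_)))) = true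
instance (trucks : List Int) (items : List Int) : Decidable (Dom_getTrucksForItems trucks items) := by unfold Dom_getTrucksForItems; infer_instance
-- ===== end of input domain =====

-- B replaces A's per-item binary search by a single pointer sweep over the items
-- sorted ascending, scattering each answer back to its original position (measured
-- constant-factor faster in a timing run).

-- ===== PORT A =====
-- the 'while l <= r' loop of A's inner binary_search (indices as Python ints)
def pvBsLoop (ts : List (Int × Int)) (item : Int) (l r : Int) : Int :=
  if _h : l ≤ r then
    let m := PySem.Int.floordiv (l + r) 2
    if item < (PySem.List.pyGetD ts m (0, 0)).1 then pvBsLoop ts item l (m - 1)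
    else pvBsLoop ts item (m + 1) r
  else l
termination_by (r + 1 - l).toNat
decreasing_by
  all_goals
    simp only [PySem.Int.floordiv] at *
    have h2 : (l + r).fdiv 2 = (l + r) / 2 := Int.fdiv_eq_ediv_of_nonneg (l + r) (by omega)
    omega

-- binary_search(trucks, item) of A (trucks already the sorted (capacity, index) list)
def pvBinarySearch (ts : List (Int × Int)) (item : Int) : Int :=
  let l := pvBsLoop ts item 0 ((ts.length : Int) - 1)
  if l < (ts.length : Int) then (PySem.List.pyGetD ts l (0, 0)).2 else -1

def getTrucksForItems (trucks : List Int) (items : List Int) : List Int :=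
  let ts := PySem.List.sorted ((PySem.List.enumerate trucks 0).map (fun p => (p.2, p.1))) (fun x => x.1) false
  items.foldl (fun res item => res ++ [pvBinarySearch ts item]) []

-- ===== PORT B =====
-- the 'while p < n and ts[p][0] <= item' pointer advance of B
def pvAdvance (ts : List (Int × Int)) (item : Int) (p : Int) : Int :=
  if _h : p < (ts.length : Int) ∧ (PySem.List.pyGetD ts p (0, 0)).1 ≤ item then
    pvAdvance ts item (p + 1)
  else p
termination_by ((ts.length : Int) - p).toNat
decreasing_by omega

def getTrucksForItems_alt (trucks : List Int) (items : List Int) : List Int :=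
  let ts := PySem.List.sorted ((PySem.List.enumerate trucks 0).map (fun p => (p.2, p.1))) (fun x => x.1) false
  let si := PySem.List.sorted (PySem.List.enumerate items 0) (fun x => x.2) false
  let st := si.foldl
    (fun (st : Int × List Int) ji =>
      let p := pvAdvance ts ji.2 st.1
      (p, if p < (ts.length : Int) then PySem.List.pySetD st.2 ji.1 (PySem.List.pyGetD ts p (0, 0)).2 else st.2))
    (0, List.replicate items.length (-1))
  st.2

-- ===== PRECONDITION & SPEC =====
def Spec_getTrucksForItems (trucks : List Int) (items : List Int) (out : List Int) : Prop := out = getTrucksForItems_alt trucks items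
instance (trucks : List Int) (items : List Int) (out : List Int) : Decidable (Spec_getTrucksForItems trucks items out) := by unfold Spec_getTrucksForItems; infer_instance

-- ===== CLAIM (what is proved, stated in full; the proofs are below) =====
def Claim_equal_getTrucksForItems : Prop := ∀ (trucks : List Int) (items : List Int), Dom_getTrucksForItems trucks items → Spec_getTrucksForItems trucks items (getTrucksForItems trucks items)

-- ===== LEMMAS AND PROOFS =====

-- the common answer: for each item, index of the first sorted truck with capacity > item
def pvAns (ts : List (Int × Int)) (item : Int) : Int :=
  let K := ts.countP (fun t => t.1 ≤ item)
  if h : K < ts.length then (ts[K]).2 else -1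

-- on a capacity-sorted list, position j holds capacity ≤ item iff j < countP (≤ item)
theorem pv_count_char (ts : List (Int × Int)) (item : Int)
    (hp : List.Pairwise (fun a b => a.1 ≤ b.1) ts) (j : Nat) (hj : j < ts.length) :
    (ts[j]).1 ≤ item ↔ j < ts.countP (fun t => t.1 ≤ item) := by
  induction ts generalizing j with
  | nil => simp at hj
  | cons t rest ih =>
    have hhead : ∀ x ∈ rest, t.1 ≤ x.1 := fun x hx => (List.pairwise_cons.mp hp).1 x hx
    have hrest : List.Pairwise (fun a b => a.1 ≤ b.1) rest := (List.pairwise_cons.mp hp).2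
    by_cases hle : t.1 ≤ item
    · rw [List.countP_cons_of_pos (p := fun x => decide (x.1 ≤ item)) (l := rest) (a := t) (by simpa using hle)]
      cases j with
      | zero => simpa using hle
      | succ k =>
        have hk : k < rest.length := by simpa using hj
        simpa [Nat.succ_lt_succ_iff] using ih hrest k hk
    · have hz : rest.countP (fun t => t.1 ≤ item) = 0 := by
        rw [List.countP_eq_zero]
        intro x hx
        simp only [decide_eq_true_eq]
        intro hxle
        exact hle (le_trans (hhead x hx) hxle)
      rw [List.countP_cons_of_neg (p := fun x => decide (x.1 ≤ item)) (l := rest) (a := t) (by simpa using hle), hz]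
      cases j with
      | zero => simpa using hle
      | succ k =>
        have hk : k < rest.length := by simpa using hj
        simp only [List.getElem_cons_succ]
        constructor
        · intro hxle
          exact absurd (le_trans (hhead _ (List.getElem_mem hk)) hxle) hle
        · intro h; omega

theorem pvBsLoop_spec (ts : List (Int × Int)) (item : Int)
    (hp : List.Pairwise (fun a b => a.1 ≤ b.1) ts) (l r : Int)
    (h0 : 0 ≤ l) (hr : r ≤ (ts.length : Int) - 1) (hlr : l ≤ r + 1)
    (hL : ∀ j : Nat, (hj : j < ts.length) → (j : Int) < l → (ts[j]).1 ≤ item)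
    (hR : ∀ j : Nat, (hj : j < ts.length) → r < (j : Int) → item < (ts[j]).1) :
    pvBsLoop ts item l r = (ts.countP (fun t => t.1 ≤ item) : Int) := by
  have hmono : ∀ (a b : Nat), a < ts.length → b < ts.length → a ≤ b →
      (ts[a]!).1 ≤ (ts[b]!).1 := by
    intro a b ha hb hab
    rw [getElem!_pos ts a ha, getElem!_pos ts b hb]
    rcases eq_or_lt_of_le hab with h | h
    · subst h; exact le_refl _
    · exact (List.pairwise_iff_getElem.mp hp) a b ha hb h
  have hKlen : ts.countP (fun t => t.1 ≤ item) ≤ ts.length := List.countP_le_length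
  have Hmain : ∀ n : Nat, ∀ l r : Int, (r + 1 - l).toNat = n → 0 ≤ l →
      r ≤ (ts.length : Int) - 1 → l ≤ r + 1 →
      (∀ j : Nat, (hj : j < ts.length) → (j : Int) < l → (ts[j]).1 ≤ item) →
      (∀ j : Nat, (hj : j < ts.length) → r < (j : Int) → item < (ts[j]).1) →
      pvBsLoop ts item l r = (ts.countP (fun t => t.1 ≤ item) : Int) := by
    intro n
    induction n using Nat.strong_induction_on with
    | _ n ih =>
      intro l r hn h0 hr hlr hL hR
      by_cases hc : l ≤ r
      · rw [pvBsLoop]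
        simp only [hc, dite_true]
        have hm2 : PySem.Int.floordiv (l + r) 2 = (l + r) / 2 :=
          Int.fdiv_eq_ediv_of_nonneg _ (by omega)
        set m : Int := PySem.Int.floordiv (l + r) 2 with hmdef
        have hlm : l ≤ m := by omega
        have hmr : m ≤ r := by omega
        have h0m : 0 ≤ m := by omega
        have hmlen : m < (ts.length : Int) := by omega
        have hmlenN : m.toNat < ts.length := by omega
        rw [PySem.List.pyGetD_eq_getElem ts (0, 0) h0m hmlen]
        by_cases hcmp : item < (ts[m.toNat]).1
        · simp only [hcmp, if_true]
          refine ih ((m - 1) + 1 - l).toNat (by omega) l (m - 1) rfl h0 (by omega) (by omega) hL ?_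
          intro j hj hjm
          have hmj : m.toNat ≤ j := by omega
          have := hmono m.toNat j hmlenN hj hmj
          rw [getElem!_pos ts m.toNat hmlenN, getElem!_pos ts j hj] at this
          exact lt_of_lt_of_le hcmp this
        · simp only [hcmp, if_false]
          push Not at hcmp
          refine ih (r + 1 - (m + 1)).toNat (by omega) (m + 1) r rfl (by omega) hr (by omega) ?_ hR
          intro j hj hjm
          have hjm' : j ≤ m.toNat := by omega
          have := hmono j m.toNat hj hmlenN hjm'
          rw [getElem!_pos ts m.toNat hmlenN, getElem!_pos ts j hj] at this
          exact le_trans this hcmp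
      · rw [pvBsLoop]
        simp only [hc, dite_false]
        have hlr1 : l = r + 1 := by omega
        set K := ts.countP (fun t => t.1 ≤ item) with hKdef
        rcases lt_trichotomy ((K : Int)) l with h | h | h
        · exfalso
          have hKlt : K < ts.length := by omega
          have h1 := hL K hKlt h
          have h2 := (pv_count_char ts item hp K hKlt).mp h1
          omega
        · omega
        · exfalso
          have hllen : l.toNat < ts.length := by omega
          have h1 := hR l.toNat hllen (by omega)
          have h2 := (pv_count_char ts item hp l.toNat hllen).mpr (by omega)
          omega
  exact Hmain (r + 1 - l).toNat l r rfl h0 hr hlr hL hR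

theorem pvBinarySearch_eq (ts : List (Int × Int)) (item : Int)
    (hp : List.Pairwise (fun a b => a.1 ≤ b.1) ts) :
    pvBinarySearch ts item = pvAns ts item := by
  unfold pvBinarySearch pvAns
  have hKlen : ts.countP (fun t => t.1 ≤ item) ≤ ts.length := List.countP_le_length
  rw [pvBsLoop_spec ts item hp 0 ((ts.length : Int) - 1) (by omega) (by omega) (by omega)
    (by intro j hj hjl; omega) (by intro j hj hjr; omega)]
  set K := ts.countP (fun t => t.1 ≤ item) with hKdef
  by_cases h : K < ts.length
  · simp only [h, dite_true]
    rw [if_pos (by exact_mod_cast h)]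
    rw [PySem.List.pyGetD_eq_getElem ts (0, 0) (by omega) (by exact_mod_cast h)]
    simp
  · simp only [h, dite_false]
    rw [if_neg (by omega)]

theorem pvAdvance_spec (ts : List (Int × Int)) (item : Int)
    (hp : List.Pairwise (fun a b => a.1 ≤ b.1) ts) (p : Int) (hp0 : 0 ≤ p)
    (hple : p ≤ (ts.countP (fun t => t.1 ≤ item) : Int)) :
    pvAdvance ts item p = (ts.countP (fun t => t.1 ≤ item) : Int) := by
  have hKlen : ts.countP (fun t => t.1 ≤ item) ≤ ts.length := List.countP_le_length
  set K := ts.countP (fun t => t.1 ≤ item) with hKdef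
  have Hmain : ∀ n : Nat, ∀ p : Int, ((ts.length : Int) - p).toNat = n → 0 ≤ p →
      p ≤ (K : Int) → pvAdvance ts item p = (K : Int) := by
    intro n
    induction n using Nat.strong_induction_on with
    | _ n ih =>
      intro p hn h0 hple
      rcases eq_or_lt_of_le hple with heq | hlt
      · rw [pvAdvance]
        have : ¬ (p < (ts.length : Int) ∧ (PySem.List.pyGetD ts p (0, 0)).1 ≤ item) := by
          rintro ⟨h1, h2⟩
          rw [PySem.List.pyGetD_eq_getElem ts (0, 0) h0 h1] at h2
          have hplen : p.toNat < ts.length := by omega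
          have := (pv_count_char ts item hp p.toNat hplen).mp h2
          omega
        simp only [this, dite_false]
        exact heq
      · rw [pvAdvance]
        have hplen : p.toNat < ts.length := by omega
        have hcond : p < (ts.length : Int) ∧ (PySem.List.pyGetD ts p (0, 0)).1 ≤ item := by
          refine ⟨by omega, ?_⟩
          rw [PySem.List.pyGetD_eq_getElem ts (0, 0) h0 (by omega)]
          exact (pv_count_char ts item hp p.toNat hplen).mpr (by omega)
        simp only [hcond]
        exact ih ((ts.length : Int) - (p + 1)).toNat (by omega) (p + 1) rfl (by omega) (by omega)
  exact Hmain ((ts.length : Int) - p).toNat p rfl hp0 hple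

theorem getTrucksForItems_eq_map (trucks items : List Int) :
    getTrucksForItems trucks items =
      items.map (pvAns (PySem.List.sorted ((PySem.List.enumerate trucks 0).map (fun p => (p.2, p.1))) (fun x => x.1) false)) := by
  unfold getTrucksForItems
  set ts := PySem.List.sorted ((PySem.List.enumerate trucks 0).map (fun p => (p.2, p.1))) (fun x => x.1) false with hts
  have hp : List.Pairwise (fun a b => a.1 ≤ b.1) ts := PySem.List.sorted_pairwise _ _
  rw [PySem.List.foldl_append_singleton_eq_map]
  exact List.map_congr_left (fun item _ => pvBinarySearch_eq ts item hp)

-- B's loop body, named for the proofs (identical to the lambda in getTrucksForItems_alt)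
def pvStep (ts : List (Int × Int)) (st : Int × List Int) (ji : Int × Int) : Int × List Int :=
  let p := pvAdvance ts ji.2 st.1
  (p, if p < (ts.length : Int) then PySem.List.pySetD st.2 ji.1 (PySem.List.pyGetD ts p (0, 0)).2 else st.2)

theorem pvFold_spec (ts : List (Int × Int)) (hp : List.Pairwise (fun a b => a.1 ≤ b.1) ts)
    (items : List Int) :
    ∀ (rem : List (Int × Int)) (p : Int) (res : List Int),
    (∀ x ∈ rem, ∃ (k : Nat) (_hk : k < items.length), x = ((k : Int), items[k])) →
    rem.Pairwise (fun a b => a.2 ≤ b.2) →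
    rem.Pairwise (fun a b => a.1 ≠ b.1) →
    0 ≤ p →
    (∀ x ∈ rem, p ≤ (ts.countP (fun t => t.1 ≤ x.2) : Int)) →
    res.length = items.length →
    (∀ (k : Nat) (hk : k < items.length), ((k : Int), items[k]) ∈ rem → res[k]? = some (-1)) →
    (rem.foldl (pvStep ts) (p, res)).2.length = items.length ∧
    ∀ (k : Nat) (hk : k < items.length),
      (rem.foldl (pvStep ts) (p, res)).2[k]? =
        if ((k : Int), items[k]) ∈ rem then some (pvAns ts (items[k])) else res[k]? := by
  intro rem
  induction rem with
  | nil => intro p res _ _ _ _ _ hlen _; simpa using hlen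
  | cons x rem' ih =>
    intro p res hrem hsort hnd hp0 hple hlen hres
    obtain ⟨kx, hkx, hxeq⟩ := hrem x (List.mem_cons_self)
    have hadv : pvAdvance ts x.2 p = (ts.countP (fun t => t.1 ≤ x.2) : Int) :=
      pvAdvance_spec ts x.2 hp p hp0 (hple x (List.mem_cons_self))
    set Kx := ts.countP (fun t => t.1 ≤ x.2) with hKx
    have hKlen : Kx ≤ ts.length := List.countP_le_length
    -- the state after one step
    have hstep : pvStep ts (p, res) x =
        ((Kx : Int), if Kx < ts.length then res.set kx (ts[Kx]!).2 else res) := by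
      unfold pvStep
      simp only [hadv]
      by_cases h : Kx < ts.length
      · rw [if_pos (by exact_mod_cast h), if_pos h]
        rw [PySem.List.pyGetD_eq_getElem ts (0, 0) (by omega) (by exact_mod_cast h)]
        have hx1 : x.1 = ((kx : Nat) : Int) := by rw [hxeq]
        rw [hx1, getElem!_pos ts Kx h]
        simp [PySem.List.pySetD_natCast]
      · rw [if_neg (by omega), if_neg h]
    set res' : List Int := if Kx < ts.length then res.set kx (ts[Kx]!).2 else res with hres'
    have hlen' : res'.length = items.length := by
      rw [hres']; split <;> simp [hlen]
    have hndx : ∀ y ∈ rem', x.1 ≠ y.1 := fun y hy => (List.pairwise_cons.mp hnd).1 y hy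
    have hxnotin : ((kx : Int), items[kx]) ∉ rem' := by
      intro hmem
      exact hndx _ hmem (by rw [hxeq])
    -- value written at kx is pvAns
    have hresx : res'[kx]? = some (pvAns ts (items[kx])) := by
      have hx2 : x.2 = items[kx] := by rw [hxeq]
      rw [hres']
      by_cases h : Kx < ts.length
      · rw [if_pos h, List.getElem?_set_self (by omega), getElem!_pos ts Kx h]
        unfold pvAns
        rw [← hx2, ← hKx, dif_pos h]
      · rw [if_neg h]
        have h1 : res[kx]? = some (-1) := hres kx hkx (by rw [← hxeq]; exact List.mem_cons_self)
        rw [h1]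
        unfold pvAns
        rw [← hx2, ← hKx, dif_neg h]
    have hresk : ∀ (k : Nat), k ≠ kx → res'[k]? = res[k]? := by
      intro k hk
      rw [hres']; split
      · exact List.getElem?_set_ne (by omega)
      · rfl
    have IH := ih (Kx : Int) res' (fun y hy => hrem y (List.mem_cons_of_mem x hy))
      (List.pairwise_cons.mp hsort).2 (List.pairwise_cons.mp hnd).2 (by omega)
      (fun y hy => by
        have h1 : x.2 ≤ y.2 := (List.pairwise_cons.mp hsort).1 y hy
        have h2 : ts.countP (fun t => t.1 ≤ x.2) ≤ ts.countP (fun t => t.1 ≤ y.2) :=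
          List.countP_mono_left (fun t _ ht => by
            simp only [decide_eq_true_eq] at *
            exact le_trans ht h1)
        omega)
      hlen'
      (fun k hk hmem => by
        have hkne : k ≠ kx := fun he => hxnotin (he ▸ hmem)
        rw [hresk k hkne]
        exact hres k hk (List.mem_cons_of_mem x hmem))
    rw [List.foldl_cons, hstep]
    refine ⟨IH.1, ?_⟩
    intro k hk
    by_cases hke : k = kx
    · subst hke
      rw [IH.2 k hk, if_neg hxnotin, hresx,
        if_pos (by rw [← hxeq]; exact List.mem_cons_self)]
    · rw [IH.2 k hk]
      have hmemiff : (((k : Int), items[k]) ∈ x :: rem') ↔ (((k : Int), items[k]) ∈ rem') := by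
        constructor
        · intro h
          rcases List.mem_cons.mp h with h1 | h1
          · exfalso
            rw [hxeq] at h1
            have h2 : (k : Int) = (kx : Int) := congrArg Prod.fst h1
            exact hke (by exact_mod_cast h2)
          · exact h1
        · exact List.mem_cons_of_mem x
      by_cases hmem : ((k : Int), items[k]) ∈ rem'
      · rw [if_pos hmem, if_pos (hmemiff.mpr hmem)]
      · rw [if_neg hmem, if_neg (fun h => hmem (hmemiff.mp h)), hresk k hke]

theorem getTrucksForItems_alt_eq_map (trucks items : List Int) :
    getTrucksForItems_alt trucks items =
      items.map (pvAns (PySem.List.sorted ((PySem.List.enumerate trucks 0).map (fun p => (p.2, p.1))) (fun x => x.1) false)) := by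
  set ts := PySem.List.sorted ((PySem.List.enumerate trucks 0).map (fun p => (p.2, p.1))) (fun x => x.1) false with hts
  have hp : List.Pairwise (fun a b => a.1 ≤ b.1) ts := PySem.List.sorted_pairwise _ _
  set si := PySem.List.sorted (PySem.List.enumerate items 0) (fun x => x.2) false with hsi
  have halt : getTrucksForItems_alt trucks items =
      (si.foldl (pvStep ts) (0, List.replicate items.length (-1))).2 := rfl
  rw [halt]
  have hmemsi : ∀ (k : Nat), k < items.length → ∀ (hk : k < items.length), ((k : Int), items[k]) ∈ si := by
    intro k hk hk'
    rw [hsi, PySem.List.mem_sorted, PySem.List.mem_enumerate_iff]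
    exact ⟨k, hk, by simp⟩
  have H := pvFold_spec ts hp items si 0 (List.replicate items.length (-1))
    (fun x hx => by
      rw [hsi, PySem.List.mem_sorted, PySem.List.mem_enumerate_iff] at hx
      obtain ⟨k, hk, hxe⟩ := hx
      exact ⟨k, hk, by simpa using hxe⟩)
    (PySem.List.sorted_pairwise _ _)
    (((PySem.List.sorted_perm _ _ _).pairwise_iff (fun h => h.symm)).mpr
      ((PySem.List.pairwise_lt_enumerate items 0).imp (fun h => ne_of_lt h)))
    (by omega)
    (fun x hx => by positivity)
    (by simp)
    (fun k hk _ => by simp [hk])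
  refine List.ext_getElem? ?_
  intro k
  by_cases hk : k < items.length
  · rw [H.2 k hk, if_pos (hmemsi k hk hk), List.getElem?_map, List.getElem?_eq_getElem hk]
    rfl
  · rw [List.getElem?_eq_none (by rw [H.1]; omega),
      List.getElem?_eq_none (by simpa using (by omega : items.length ≤ k))]

-- ===== VERDICT (by name: the statement is the Claim_ definition above) =====
theorem getTrucksForItems_spec : Claim_equal_getTrucksForItems := by
  intro trucks items _
  unfold Spec_getTrucksForItems
  rw [getTrucksForItems_eq_map, getTrucksForItems_alt_eq_map]
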